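-- pv_equiv track=rewrite | github.com/nyagami/Python-PTIT | PY01034 - ĐỔI CHỖ CÁC CHỮ SỐ.py | mind
-- ===== SOURCE A (Python) =====
-- def mind(s, i):
--     ans = i
--     for j in range(i+1, len(s)):
--         if s[j] < s[i]:
--             if ans == i: ans = j
--             elif s[ans] < s[j]: ans = j
--     if s[ans] < s[i]: return ans
--     return -1
-- ===== SOURCE B (Python) =====
-- def mind(s, i):
--     # Two-pass: first compute the largest character below s[i] in the suffix,
--     # then return the first index holding it.
--     n = len(s)
--     pivot = s[i]
--     best = None
--     for j in range(i + 1, n):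
--         if s[j] < pivot and (best is None or s[j] > best):
--             best = s[j]
--     if best is None:
--         return -1
--     for j in range(i + 1, n):
--         if s[j] == best:
--             return j
--     return -1
-- ===== Notes on version B (the rewrite author's own statement) =====
-- stated objective: simpler
-- what changed: A's single fused loop that tracks the best index with a three-way update rule is replaced by two plain passes: first compute the maximum character strictly below s[i] in the suffix, then return the first index holding it.
import Mathlib
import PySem

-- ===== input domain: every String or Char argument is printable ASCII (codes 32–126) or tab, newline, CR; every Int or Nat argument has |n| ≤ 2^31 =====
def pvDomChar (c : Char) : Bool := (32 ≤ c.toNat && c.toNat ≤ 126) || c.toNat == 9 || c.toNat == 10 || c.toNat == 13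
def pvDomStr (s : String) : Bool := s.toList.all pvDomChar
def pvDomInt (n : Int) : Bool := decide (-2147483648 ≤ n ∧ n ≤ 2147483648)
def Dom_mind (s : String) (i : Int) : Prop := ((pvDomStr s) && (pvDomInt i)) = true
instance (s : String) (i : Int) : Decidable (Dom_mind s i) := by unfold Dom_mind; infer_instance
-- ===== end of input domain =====

-- B replaces A's single fused max-tracking loop by two plain passes (find the best
-- character, then find its first index); objective: simpler, same cost.

-- ===== PORT A =====
-- s[j] under Python indexing; .getD is never reached inside Pre_mind
def pvGetC (s : String) (j : Int) : Char := (PySem.Str.pyGet? s j).getD ' '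

def mind (s : String) (i : Int) : Int :=
  let ans := (PySem.List.pyRange (i + 1) (PySem.Str.len s) 1).foldl
    (fun ans j =>
      if pvGetC s j < pvGetC s i then
        (if ans = i then j else if pvGetC s ans < pvGetC s j then j else ans)
      else ans) i
  if pvGetC s ans < pvGetC s i then ans else -1

-- ===== PORT B =====
-- B's second loop: first j in L with s[j] == best, else -1 (the trailing return)
def mindFind (s : String) (best : Char) : List Int → Int
  | [] => -1
  | j :: rest => if pvGetC s j = best then j else mindFind s best rest

def mind_alt (s : String) (i : Int) : Int :=
  let n := PySem.Str.len s
  let pivot := pvGetC s i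
  let best := (PySem.List.pyRange (i + 1) n 1).foldl
    (fun b j =>
      if pvGetC s j < pivot then
        (match b with
          | none => some (pvGetC s j)
          | some c => if c < pvGetC s j then some (pvGetC s j) else b)
      else b) none
  match best with
  | none => -1
  | some c => mindFind s c (PySem.List.pyRange (i + 1) n 1)

-- ===== PRECONDITION & SPEC =====
-- A raises IndexError on s[i] unless -len(s) ≤ i < len(s); exactly those inputs are excluded.
def Pre_mind (s : String) (i : Int) : Prop :=
  -(s.toList.length : Int) ≤ i ∧ i < (s.toList.length : Int)
instance (s : String) (i : Int) : Decidable (Pre_mind s i) := by unfold Pre_mind; infer_instance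

def pvWitness_mind : String × Int := ("52364", 1)

def Spec_mind (s : String) (i : Int) (out : Int) : Prop := out = mind_alt s i
instance (s : String) (i : Int) (out : Int) : Decidable (Spec_mind s i out) := by unfold Spec_mind; infer_instance

-- ===== CLAIM (what is proved, stated in full; the proofs are below) =====
def Claim_equal_mind : Prop := ∀ (s : String) (i : Int), Dom_mind s i → Pre_mind s i → Spec_mind s i (mind s i)

-- ===== LEMMAS AND PROOFS =====

-- Canonical description of what both passes compute: the first index (with its
-- character) achieving the maximum character strictly below s[i] in the list.
def pvBest (s : String) (i : Int) : List Int → Option (Int × Char)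
  | [] => none
  | j :: rest =>
      if pvGetC s j < pvGetC s i then
        match pvBest s i rest with
        | none => some (j, pvGetC s j)
        | some (k, c) => if pvGetC s j < c then some (k, c) else some (j, pvGetC s j)
      else pvBest s i rest

theorem pvBest_prop (s : String) (i : Int) :
    ∀ (L : List Int) (k : Int) (c : Char), pvBest s i L = some (k, c) →
      pvGetC s k = c ∧ c < pvGetC s i := by
  intro L
  induction L with
  | nil => intro k c h; simp [pvBest] at h
  | cons j rest ih =>
    intro k c h
    by_cases hj : pvGetC s j < pvGetC s i
    · cases hb : pvBest s i rest with
      | none =>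
        simp only [pvBest, if_pos hj, hb] at h
        simp at h
        rw [← h.1, ← h.2]
        exact ⟨rfl, hj⟩
      | some kc =>
        obtain ⟨k0, c0⟩ := kc
        simp only [pvBest, if_pos hj, hb] at h
        by_cases hlt : pvGetC s j < c0
        · simp only [if_pos hlt] at h
          simp at h
          rw [← h.1, ← h.2]
          exact ih k0 c0 hb
        · simp only [if_neg hlt] at h
          simp at h
          rw [← h.1, ← h.2]
          exact ⟨rfl, hj⟩
    · simp only [pvBest, if_neg hj] at h
      exact ih k c h

-- A's fused loop computes the index component of pvBest.
theorem foldA_best (s : String) (i : Int) :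
    ∀ (L : List Int), (∀ j ∈ L, j ≠ i) →
      ((L.foldl (fun ans j =>
          if pvGetC s j < pvGetC s i then
            (if ans = i then j else if pvGetC s ans < pvGetC s j then j else ans)
          else ans) i
        = (match pvBest s i L with | none => i | some (k, _) => k)) ∧
       (∀ ans, ans ≠ i → pvGetC s ans < pvGetC s i →
        L.foldl (fun ans j =>
          if pvGetC s j < pvGetC s i then
            (if ans = i then j else if pvGetC s ans < pvGetC s j then j else ans)
          else ans) ans
        = (match pvBest s i L with
           | none => ans
           | some (k, c) => if pvGetC s ans < c then k else ans))) := by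
  intro L
  induction L with
  | nil =>
    intro _
    exact ⟨by simp [pvBest], by intro ans _ _; simp [pvBest]⟩
  | cons j rest ih =>
    intro hni
    have hji : j ≠ i := hni j (by simp)
    have hrest : ∀ x ∈ rest, x ≠ i := fun x hx => hni x (by simp [hx])
    have IH := ih hrest
    constructor
    · simp only [List.foldl_cons]
      by_cases hj : pvGetC s j < pvGetC s i
      · rw [if_pos hj]
        simp only [if_true]
        rw [IH.2 j hji hj]
        simp only [pvBest, if_pos hj]
        cases hb : pvBest s i rest with
        | none => simp
        | some kc =>
          obtain ⟨k, c⟩ := kc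
          by_cases hlt : pvGetC s j < c <;> simp [hlt]
      · rw [if_neg hj, IH.1]
        simp only [pvBest, if_neg hj]
    · intro ans hans hlt
      simp only [List.foldl_cons]
      by_cases hj : pvGetC s j < pvGetC s i
      · rw [if_pos hj, if_neg hans]
        by_cases hup : pvGetC s ans < pvGetC s j
        · rw [if_pos hup, IH.2 j hji hj]
          simp only [pvBest, if_pos hj]
          cases hb : pvBest s i rest with
          | none => simp [hup]
          | some kc =>
            obtain ⟨k, c⟩ := kc
            by_cases h2 : pvGetC s j < c
            · have h3 : pvGetC s ans < c := lt_trans hup h2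
              simp [h2, h3]
            · simp [h2, hup]
        · rw [if_neg hup, IH.2 ans hans hlt]
          simp only [pvBest, if_pos hj]
          cases hb : pvBest s i rest with
          | none => simp [hup]
          | some kc =>
            obtain ⟨k, c⟩ := kc
            by_cases h2 : pvGetC s j < c
            · simp [h2]
            · have hcj : c ≤ pvGetC s j := le_of_not_gt h2
              have hja : pvGetC s j ≤ pvGetC s ans := le_of_not_gt hup
              have h3 : ¬ pvGetC s ans < c := not_lt_of_ge (le_trans hcj hja)
              simp [h2, hup, h3]
      · rw [if_neg hj, IH.2 ans hans hlt]
        simp only [pvBest, if_neg hj]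

-- B's first pass computes the character component of pvBest.
theorem foldM_best (s : String) (i : Int) :
    ∀ (L : List Int) (b : Option Char),
      L.foldl (fun b j =>
        if pvGetC s j < pvGetC s i then
          (match b with
            | none => some (pvGetC s j)
            | some c => if c < pvGetC s j then some (pvGetC s j) else b)
        else b) b
      = (match b, pvBest s i L with
         | none, o => o.map Prod.snd
         | some c, none => some c
         | some c, some (_, c') => some (if c < c' then c' else c)) := by
  intro L
  induction L with
  | nil => intro b; cases b <;> simp [pvBest]
  | cons j rest ih =>
    intro b
    by_cases hj : pvGetC s j < pvGetC s i
    · cases b with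
      | none =>
        simp only [List.foldl_cons, if_pos hj]
        rw [ih (some (pvGetC s j))]
        simp only [pvBest, if_pos hj]
        cases hb : pvBest s i rest with
        | none => simp
        | some kc =>
          obtain ⟨k, c⟩ := kc
          by_cases h2 : pvGetC s j < c <;> simp [h2]
      | some c0 =>
        simp only [List.foldl_cons, if_pos hj]
        by_cases hup : c0 < pvGetC s j
        · rw [if_pos hup, ih (some (pvGetC s j))]
          simp only [pvBest, if_pos hj]
          cases hb : pvBest s i rest with
          | none => simp [hup]
          | some kc =>
            obtain ⟨k, c⟩ := kc
            by_cases h2 : pvGetC s j < c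
            · have : c0 < c := lt_trans hup h2
              simp [h2, this]
            · simp [h2, hup]
        · rw [if_neg hup, ih (some c0)]
          simp only [pvBest, if_pos hj]
          cases hb : pvBest s i rest with
          | none => simp [hup]
          | some kc =>
            obtain ⟨k, c⟩ := kc
            by_cases h2 : pvGetC s j < c
            · simp [h2]
            · have hcj : c ≤ pvGetC s j := le_of_not_gt h2
              have hja : pvGetC s j ≤ c0 := le_of_not_gt hup
              have : ¬ c0 < c := not_lt_of_ge (le_trans hcj hja)
              simp [h2, hup, this]
    · simp only [List.foldl_cons, if_neg hj]
      rw [ih b]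
      simp only [pvBest, if_neg hj]

-- B's second pass finds exactly pvBest's index.
theorem find_best (s : String) (i : Int) :
    ∀ (L : List Int) (k : Int) (c : Char), pvBest s i L = some (k, c) →
      mindFind s c L = k := by
  intro L
  induction L with
  | nil => intro k c h; simp [pvBest] at h
  | cons j rest ih =>
    intro k c h
    by_cases hj : pvGetC s j < pvGetC s i
    · cases hb : pvBest s i rest with
      | none =>
        simp only [pvBest, if_pos hj, hb] at h
        simp at h
        rw [← h.1, ← h.2]
        simp [mindFind]
      | some kc =>
        obtain ⟨k0, c0⟩ := kc
        simp only [pvBest, if_pos hj, hb] at h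
        by_cases hlt : pvGetC s j < c0
        · simp only [if_pos hlt] at h
          simp at h
          rw [← h.1, ← h.2]
          simp [mindFind, ne_of_lt hlt, ih k0 c0 hb]
        · simp only [if_neg hlt] at h
          simp at h
          rw [← h.1, ← h.2]
          simp [mindFind]
    · simp only [pvBest, if_neg hj] at h
      have hkc := pvBest_prop s i rest k c h
      have hne : pvGetC s j ≠ c := by
        intro heq
        exact hj (heq ▸ hkc.2)
      simp [mindFind, hne, ih k c h]

-- ===== VERDICT (by name: the statement is the Claim_ definition above) =====
theorem mind_spec : Claim_equal_mind := by
  intro s i _ _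
  unfold Spec_mind mind mind_alt
  have hni : ∀ j ∈ PySem.List.pyRange (i + 1) (PySem.Str.len s) 1, j ≠ i := by
    intro j hj
    have := (PySem.List.mem_pyRange_one.mp hj).1
    omega
  have hA := (foldA_best s i (PySem.List.pyRange (i + 1) (PySem.Str.len s) 1) hni).1
  have hM := foldM_best s i (PySem.List.pyRange (i + 1) (PySem.Str.len s) 1) none
  simp only []
  rw [hA, hM]
  cases hb : pvBest s i (PySem.List.pyRange (i + 1) (PySem.Str.len s) 1) with
  | none =>
    simp
  | some kc =>
    obtain ⟨k, c⟩ := kc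
    have hkc := pvBest_prop s i _ k c hb
    simp only [Option.map_some]
    rw [if_pos (hkc.1 ▸ hkc.2)]
    exact (find_best s i _ k c hb).symm
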